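-- pv_equiv track=rewrite | github.com/Shubham-Jambhale/predict_the_winner | predict-the-winner.py | predict_winner
-- ===== SOURCE A (Python) =====
-- def predict_winner ( s ) :
--     astk=[]
--     ostk=[]
--
--     for i in range(len(s)):
--         if s[i] == "A":
--             astk.append(i)
--         if s[i] == "O":
--             ostk.append(i)
--
--     while astk != [] and ostk != []:
--
--         a = astk.pop(0)
--         o = ostk.pop(0)
--
--         if a < o:
--             astk.append((a+len(s)))
--         else :
--             ostk.append((o+len(s)))
--
--     if astk == []:
--         return "Orange"
--     else:
--         return "Apple"
-- ===== SOURCE B (Python) =====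
-- def predict_winner(s):
--     # One circular list of party labels instead of two index queues: each round the
--     # earliest senator bans the first senator of the other party and rejoins at the back.
--     q = [c for c in s if c in 'AO']
--     while 'A' in q and 'O' in q:
--         x = q.pop(0)
--         q.remove('O' if x == 'A' else 'A')
--         q.append(x)
--     return 'Orange' if 'A' not in q else 'Apple'
-- ===== Notes on version B (the rewrite author's own statement) =====
-- stated objective: simpler
-- what changed: B replaces A's two index queues (with index+len re-appending and integer comparisons) by a single circular list of party labels: pop the front label, remove the first opposite label, re-append the front; the winner is read off by membership.
import Mathlib
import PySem

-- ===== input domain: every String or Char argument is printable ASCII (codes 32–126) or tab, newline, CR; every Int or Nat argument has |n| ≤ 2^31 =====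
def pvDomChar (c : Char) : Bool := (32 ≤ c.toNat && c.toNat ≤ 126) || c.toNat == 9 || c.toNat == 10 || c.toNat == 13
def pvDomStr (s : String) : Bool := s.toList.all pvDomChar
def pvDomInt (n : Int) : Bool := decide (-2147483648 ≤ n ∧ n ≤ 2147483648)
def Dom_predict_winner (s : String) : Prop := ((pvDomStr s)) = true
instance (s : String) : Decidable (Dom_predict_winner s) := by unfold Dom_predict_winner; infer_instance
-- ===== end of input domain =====

-- B replaces A's two index queues by one circular list of party labels (simpler, same behaviour).

-- ===== PORT A =====
-- the while loop of A: pop the front of each stack, re-append the winner with index + n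
def pvLoopA (n : Int) : List Int → List Int → List Int × List Int
  | a :: as, o :: os =>
      if a < o then pvLoopA n (as ++ [a + n]) os
      else pvLoopA n as (os ++ [o + n])
  | astk, ostk => (astk, ostk)
termination_by astk ostk => astk.length + ostk.length

def predict_winner (s : String) : String :=
  let n : Int := PySem.Str.len s
  let st := (PySem.List.pyRange 0 n 1).foldl
    (fun (st : List Int × List Int) i =>
      let st := if PySem.Str.pyGet? s i = some 'A' then (st.1 ++ [i], st.2) else st
      if PySem.Str.pyGet? s i = some 'O' then (st.1, st.2 ++ [i]) else st)
    ([], [])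
  let fin := pvLoopA n st.1 st.2
  if fin.1 = [] then "Orange" else "Apple"

-- ===== PORT B =====
-- the while loop of B: pop the front label, remove the first opposite label, re-append
def pvLoopB (q : List Char) : List Char :=
  match q with
  | [] => []
  | x :: rest =>
      if h : 'A' ∈ x :: rest ∧ 'O' ∈ x :: rest then
        pvLoopB (rest.erase (if x = 'A' then 'O' else 'A') ++ [x])
      else x :: rest
termination_by q.length
decreasing_by
  have hopp : (if x = 'A' then 'O' else 'A') ∈ rest := by
    rcases h with ⟨hA, hO⟩
    by_cases hx : x = 'A'
    · subst hx
      simp at hO ⊢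
      exact hO
    · simp [hx] at hA ⊢
      rcases hA with h1 | h2
      · exact absurd h1.symm hx
      · exact h2
  have h1 := List.length_erase_of_mem hopp
  have h2 : 0 < rest.length := List.length_pos_of_mem hopp
  simp [h1]
  omega

def predict_winner_alt (s : String) : String :=
  let q := s.toList.filter (fun c => c == 'A' || c == 'O')
  let r := pvLoopB q
  if 'A' ∉ r then "Orange" else "Apple"

-- ===== PRECONDITION & SPEC =====
def Spec_predict_winner (s : String) (out : String) : Prop := out = predict_winner_alt s
instance (s : String) (out : String) : Decidable (Spec_predict_winner s out) := by unfold Spec_predict_winner; infer_instance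

-- ===== CLAIM (what is proved, stated in full; the proofs are below) =====
def Claim_equal_predict_winner : Prop := ∀ (s : String), Dom_predict_winner s → Spec_predict_winner s (predict_winner s)

-- ===== LEMMAS AND PROOFS =====

-- merged label sequence of the two (strictly sorted, disjoint) index queues
def pvMerge : List Int → List Int → List Char
  | [], ys => ys.map fun _ => 'O'
  | _ :: xs, [] => 'A' :: (xs.map fun _ => 'A')
  | x :: xs, y :: ys =>
      if x < y then 'A' :: pvMerge xs (y :: ys) else 'O' :: pvMerge (x :: xs) ys
termination_by xs ys => xs.length + ys.length

lemma pvMerge_nil_right (xs : List Int) : pvMerge xs [] = xs.map fun _ => 'A' := by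
  cases xs <;> simp [pvMerge]

lemma pvMerge_memA (xs ys : List Int) : 'A' ∈ pvMerge xs ys ↔ xs ≠ [] := by
  induction xs, ys using pvMerge.induct with
  | case1 ys => simp [pvMerge]
  | case2 x xs => simp [pvMerge]
  | case3 x xs y ys h ih => simp [pvMerge, h, ih]
  | case4 x xs y ys h ih => simp [pvMerge, h, ih]

lemma pvMerge_memO (xs ys : List Int) : 'O' ∈ pvMerge xs ys ↔ ys ≠ [] := by
  induction xs, ys using pvMerge.induct with
  | case1 ys => simp [pvMerge]
  | case2 x xs => simp [pvMerge]
  | case3 x xs y ys h ih => simp [pvMerge, h, ih]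
  | case4 x xs y ys h ih => simp [pvMerge, h, ih]

lemma pvMerge_singleton_left (ys : List Int) (M : Int) (hy : ∀ z ∈ ys, z < M) :
    pvMerge [M] ys = (ys.map fun _ => 'O') ++ ['A'] := by
  induction ys with
  | nil => simp [pvMerge]
  | cons y ys ih =>
    have hM : ¬ M < y := by have := hy y (by simp); omega
    simp only [pvMerge, hM, if_false]
    rw [ih (fun z hz => hy z (by simp [hz]))]
    simp

lemma pvMerge_singleton_right (xs : List Int) (M : Int) (hx : ∀ z ∈ xs, z < M) :
    pvMerge xs [M] = (xs.map fun _ => 'A') ++ ['O'] := by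
  induction xs with
  | nil => simp [pvMerge]
  | cons x xs ih =>
    have hM : x < M := hx x (by simp)
    simp only [pvMerge, hM, if_true]
    rw [ih (fun z hz => hx z (by simp [hz]))]
    simp

-- appending a strict maximum to the A-queue appends an 'A' label
lemma pvMerge_append_max_A (xs ys : List Int) (M : Int)
    (hx : ∀ z ∈ xs, z < M) (hy : ∀ z ∈ ys, z < M) :
    pvMerge (xs ++ [M]) ys = pvMerge xs ys ++ ['A'] := by
  induction xs, ys using pvMerge.induct with
  | case1 ys => simpa [pvMerge] using pvMerge_singleton_left ys M hy
  | case2 x xs => simp [pvMerge]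
  | case3 x xs y ys h ih =>
    simp only [List.cons_append, pvMerge, h, if_true]
    rw [ih (fun z hz => hx z (by simp [hz])) hy]
  | case4 x xs y ys h ih =>
    simp only [List.cons_append, pvMerge, h, if_false] at ih ⊢
    rw [ih hx (fun z hz => hy z (by simp [hz]))]

lemma pvMerge_append_max_O (xs ys : List Int) (M : Int)
    (hx : ∀ z ∈ xs, z < M) (hy : ∀ z ∈ ys, z < M) :
    pvMerge xs (ys ++ [M]) = pvMerge xs ys ++ ['O'] := by
  induction xs, ys using pvMerge.induct with
  | case1 ys => simp [pvMerge]
  | case2 x xs => simpa [pvMerge] using pvMerge_singleton_right (x :: xs) M hx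
  | case3 x xs y ys h ih =>
    simp only [List.cons_append, pvMerge, h, if_true] at ih ⊢
    rw [ih (fun z hz => hx z (by simp [hz])) hy]
  | case4 x xs y ys h ih =>
    simp only [List.cons_append, pvMerge, h, if_false] at ih ⊢
    rw [ih hx (fun z hz => hy z (by simp [hz]))]

-- erasing the first 'O' of the merge removes the O-queue's head
lemma pvMerge_erase_O (xs ys : List Int) (y : Int) (hy : ∀ z ∈ ys, y < z) :
    (pvMerge xs (y :: ys)).erase 'O' = pvMerge xs ys := by
  induction xs with
  | nil =>
    simp [pvMerge, List.erase_cons_head]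
  | cons x xs ih =>
    by_cases h : x < y
    · simp only [pvMerge, h, if_true]
      rw [List.erase_cons_tail (by decide), ih]
      cases ys with
      | nil => rw [pvMerge_nil_right, pvMerge_nil_right]; simp
      | cons y' ys' =>
        have hxy : x < y' := lt_trans h (hy y' (by simp))
        simp [pvMerge, hxy]
    · simp only [pvMerge, h, if_false]
      rw [List.erase_cons_head]

lemma pvMerge_erase_A (xs ys : List Int) (x : Int) (hx : ∀ z ∈ xs, x < z) :
    (pvMerge (x :: xs) ys).erase 'A' = pvMerge xs ys := by
  induction ys with
  | nil =>
    rw [pvMerge_nil_right, pvMerge_nil_right]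
    simp [List.erase_cons_head]
  | cons y ys ih =>
    by_cases h : x < y
    · simp only [pvMerge, h, if_true]
      rw [List.erase_cons_head]
    · simp only [pvMerge, h, if_false]
      rw [List.erase_cons_tail (by decide), ih]
      cases xs with
      | nil => simp [pvMerge]
      | cons x' xs' =>
        have hxy : ¬ x' < y := by have := hx x' (by simp); omega
        simp [pvMerge, hxy]

lemma pvLoopB_noop (q : List Char) (h : ¬ ('A' ∈ q ∧ 'O' ∈ q)) : pvLoopB q = q := by
  cases q with
  | nil => simp [pvLoopB]
  | cons x rest => rw [pvLoopB, dif_neg h]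

-- the invariant A's loop maintains
def pvInv (n : Int) (as os : List Int) : Prop :=
  as.Pairwise (· < ·) ∧ os.Pairwise (· < ·) ∧
  (∀ x ∈ as, ∀ y ∈ os, x ≠ y) ∧
  (∀ x ∈ as ++ os, ∀ y ∈ as ++ os, x < y + n)

lemma pvInv_stepA (n a o : Int) (as os : List Int) (h : a < o)
    (hInv : pvInv n (a :: as) (o :: os)) : pvInv n (as ++ [a + n]) os := by
  obtain ⟨pa, po, hd, hb⟩ := hInv
  have hn : 0 < n := by have := hb a (by simp) a (by simp); omega
  have hbnd : ∀ z, z ∈ as ++ os → z < a + n := by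
    intro z hz
    rcases List.mem_append.mp hz with hz | hz
    · exact hb z (by simp [hz]) a (by simp)
    · exact hb z (by simp [hz]) a (by simp)
  have halt : ∀ z, z ∈ as ++ os → a < z := by
    intro z hz
    rcases List.mem_append.mp hz with hz | hz
    · exact (List.pairwise_cons.mp pa).1 z hz
    · exact lt_trans h ((List.pairwise_cons.mp po).1 z hz)
  refine ⟨?_, (List.pairwise_cons.mp po).2, ?_, ?_⟩
  · rw [List.pairwise_append]
    refine ⟨(List.pairwise_cons.mp pa).2, by simp, ?_⟩
    intro z hz w hw
    simp at hw
    subst hw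
    exact hbnd z (by simp [hz])
  · intro x hx y hy
    rcases List.mem_append.mp hx with hx | hx
    · exact hd x (by simp [hx]) y (by simp [hy])
    · simp at hx
      subst hx
      have := hbnd y (by simp [hy])
      omega
  · intro x hx y hy
    have hx' : x = a + n ∨ x ∈ as ++ os := by
      rcases List.mem_append.mp hx with hx | hx
      · rcases List.mem_append.mp hx with hx | hx
        · exact Or.inr (by simp [hx])
        · simp at hx; exact Or.inl hx
      · exact Or.inr (by simp [hx])
    have hy' : y = a + n ∨ y ∈ as ++ os := by
      rcases List.mem_append.mp hy with hy | hy
      · rcases List.mem_append.mp hy with hy | hy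
        · exact Or.inr (by simp [hy])
        · simp at hy; exact Or.inl hy
      · exact Or.inr (by simp [hy])
    rcases hx' with rfl | hx' <;> rcases hy' with h' | hy'
    · omega
    · have := halt y hy'; omega
    · subst h'; have := hbnd x hx'; omega
    · exact hb x (by rcases List.mem_append.mp hx' with h'|h' <;> simp [h'])
                y (by rcases List.mem_append.mp hy' with h'|h' <;> simp [h'])

lemma pvInv_stepO (n a o : Int) (as os : List Int) (h : ¬ a < o)
    (hInv : pvInv n (a :: as) (o :: os)) : pvInv n as (os ++ [o + n]) := by
  obtain ⟨pa, po, hd, hb⟩ := hInv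
  have hao : o < a := by have := hd a (by simp) o (by simp); omega
  have hn : 0 < n := by have := hb o (by simp) o (by simp); omega
  have hbnd : ∀ z, z ∈ as ++ os → z < o + n := by
    intro z hz
    rcases List.mem_append.mp hz with hz | hz
    · exact hb z (by simp [hz]) o (by simp)
    · exact hb z (by simp [hz]) o (by simp)
  have holt : ∀ z, z ∈ as ++ os → o < z := by
    intro z hz
    rcases List.mem_append.mp hz with hz | hz
    · exact lt_trans hao ((List.pairwise_cons.mp pa).1 z hz)
    · exact (List.pairwise_cons.mp po).1 z hz
  refine ⟨(List.pairwise_cons.mp pa).2, ?_, ?_, ?_⟩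
  · rw [List.pairwise_append]
    refine ⟨(List.pairwise_cons.mp po).2, by simp, ?_⟩
    intro z hz w hw
    simp at hw
    subst hw
    exact hbnd z (by simp [hz])
  · intro x hx y hy
    rcases List.mem_append.mp hy with hy | hy
    · exact hd x (by simp [hx]) y (by simp [hy])
    · simp at hy
      subst hy
      have := hbnd x (by simp [hx])
      omega
  · intro x hx y hy
    have hx' : x = o + n ∨ x ∈ as ++ os := by
      rcases List.mem_append.mp hx with hx | hx
      · exact Or.inr (by simp [hx])
      · rcases List.mem_append.mp hx with hx | hx
        · exact Or.inr (by simp [hx])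
        · simp at hx; exact Or.inl hx
    have hy' : y = o + n ∨ y ∈ as ++ os := by
      rcases List.mem_append.mp hy with hy | hy
      · exact Or.inr (by simp [hy])
      · rcases List.mem_append.mp hy with hy | hy
        · exact Or.inr (by simp [hy])
        · simp at hy; exact Or.inl hy
    rcases hx' with rfl | hx' <;> rcases hy' with h' | hy'
    · omega
    · have := holt y hy'; omega
    · subst h'; have := hbnd x hx'; omega
    · exact hb x (by rcases List.mem_append.mp hx' with h'|h' <;> simp [h'])
                y (by rcases List.mem_append.mp hy' with h'|h' <;> simp [h'])

-- the bisimulation: B's loop on the merged labels tracks A's loop on the queues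
lemma pvSim (n : Int) (as os : List Int) : pvInv n as os →
    pvLoopB (pvMerge as os) = pvMerge (pvLoopA n as os).1 (pvLoopA n as os).2 := by
  induction as, os using pvLoopA.induct n with
  | case1 a as o os h ih =>
    intro hInv
    obtain ⟨pa, po, hd, hb⟩ := hInv
    have hbA : ∀ z ∈ as, z < a + n := fun z hz => hb z (by simp [hz]) a (by simp)
    have hbO : ∀ z ∈ os, z < a + n := fun z hz => hb z (by simp [hz]) a (by simp)
    have hm : pvMerge (a :: as) (o :: os) = 'A' :: pvMerge as (o :: os) := by
      simp [pvMerge, h]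
    have hcond : 'A' ∈ 'A' :: pvMerge as (o :: os) ∧ 'O' ∈ 'A' :: pvMerge as (o :: os) := by
      constructor
      · simp
      · simp [pvMerge_memO]
    have hL : pvLoopA n (a :: as) (o :: os) = pvLoopA n (as ++ [a + n]) os := by
      rw [pvLoopA]
      simp [h]
    rw [hm, pvLoopB, dif_pos hcond, if_pos rfl,
        pvMerge_erase_O as os o (List.pairwise_cons.mp po).1,
        ← pvMerge_append_max_A as os (a + n) hbA hbO, hL]
    exact ih (pvInv_stepA n a o as os h ⟨pa, po, hd, hb⟩)
  | case2 a as o os h ih =>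
    intro hInv
    obtain ⟨pa, po, hd, hb⟩ := hInv
    have hbA : ∀ z ∈ as, z < o + n := fun z hz => hb z (by simp [hz]) o (by simp)
    have hbO : ∀ z ∈ os, z < o + n := fun z hz => hb z (by simp [hz]) o (by simp)
    have hm : pvMerge (a :: as) (o :: os) = 'O' :: pvMerge (a :: as) os := by
      simp [pvMerge, h]
    have hcond : 'A' ∈ 'O' :: pvMerge (a :: as) os ∧ 'O' ∈ 'O' :: pvMerge (a :: as) os := by
      constructor
      · simp [pvMerge_memA]
      · simp
    have hL : pvLoopA n (a :: as) (o :: os) = pvLoopA n as (os ++ [o + n]) := by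
      rw [pvLoopA]
      simp [h]
    rw [hm, pvLoopB, dif_pos hcond, if_neg (by decide),
        pvMerge_erase_A as os a (List.pairwise_cons.mp pa).1,
        ← pvMerge_append_max_O as os (o + n) hbA hbO, hL]
    exact ih (pvInv_stepO n a o as os h ⟨pa, po, hd, hb⟩)
  | case3 astk ostk h =>
    intro _
    have hnm : astk = [] ∨ ostk = [] := by
      cases astk with
      | nil => exact Or.inl rfl
      | cons a as =>
        cases ostk with
        | nil => exact Or.inr rfl
        | cons o os => exact absurd (h a as o os rfl rfl) (by simp)
    have hL : pvLoopA n astk ostk = (astk, ostk) := by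
      rcases hnm with rfl | rfl
      · rw [pvLoopA] <;> intro a as o os h1 h2 <;> simp_all
      · cases astk <;> rw [pvLoopA] <;> intro a as o os h1 h2 <;> simp_all
    rw [hL]
    apply pvLoopB_noop
    rcases hnm with rfl | rfl
    · simp [pvMerge_memA]
    · simp [pvMerge_memO]

-- the foldl building the two stacks is a pair of filters
lemma pvBuild_eq (l : List Int) (p q : Int → Prop) [DecidablePred p] [DecidablePred q]
    (acc1 acc2 : List Int) :
    l.foldl (fun (st : List Int × List Int) i =>
      let st := if p i then (st.1 ++ [i], st.2) else st
      if q i then (st.1, st.2 ++ [i]) else st) (acc1, acc2)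
    = (acc1 ++ l.filter (fun i => decide (p i)), acc2 ++ l.filter (fun i => decide (q i))) := by
  induction l generalizing acc1 acc2 with
  | nil => simp
  | cons a l ih => by_cases hp : p a <;> by_cases hq : q a <;> simp [hp, hq, ih]

-- the merge of the two built stacks is exactly B's filtered label list
lemma pvMerge_build (s : String) (m : Nat) (hm : m ≤ s.toList.length) :
    pvMerge ((PySem.List.pyRange 0 m 1).filter (fun i => decide (PySem.Str.pyGet? s i = some 'A')))
            ((PySem.List.pyRange 0 m 1).filter (fun i => decide (PySem.Str.pyGet? s i = some 'O')))
    = (s.toList.take m).filter (fun c => c == 'A' || c == 'O') := by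
  induction m with
  | zero => simp [PySem.List.pyRange_one_eq_nil, pvMerge]
  | succ m ih =>
    have hm' : m ≤ s.toList.length := Nat.le_of_succ_le hm
    have hlt : m < s.toList.length := hm
    have hcast : ((m + 1 : Nat) : Int) = (m : Int) + 1 := by push_cast; ring
    have hsplit : PySem.List.pyRange 0 ((m + 1 : Nat) : Int) 1
        = PySem.List.pyRange 0 (m : Int) 1 ++ [(m : Int)] := by
      rw [hcast, PySem.List.pyRange_one_succ_right (by positivity)]
    have hget : PySem.Str.pyGet? s (m : Int) = some s.toList[m] := by
      simp [List.getElem?_eq_getElem hlt]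
    have htake : s.toList.take (m + 1) = s.toList.take m ++ [s.toList[m]] := by
      rw [List.take_succ]
      simp [List.getElem?_eq_getElem hlt]
    have hboundA : ∀ z ∈ (PySem.List.pyRange 0 (m : Int) 1).filter
        (fun i => decide (PySem.Str.pyGet? s i = some 'A')), z < (m : Int) := by
      intro z hz
      exact ((PySem.List.mem_pyRange_one).mp (List.mem_of_mem_filter hz)).2
    have hboundO : ∀ z ∈ (PySem.List.pyRange 0 (m : Int) 1).filter
        (fun i => decide (PySem.Str.pyGet? s i = some 'O')), z < (m : Int) := by
      intro z hz
      exact ((PySem.List.mem_pyRange_one).mp (List.mem_of_mem_filter hz)).2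
    rw [hsplit, List.filter_append, List.filter_append, htake, List.filter_append]
    by_cases hA : s.toList[m] = 'A'
    · have : ¬ PySem.Str.pyGet? s (m : Int) = some 'O' := by simp [List.getElem?_eq_getElem hlt, hA]
      simp only [List.filter_cons, List.filter_nil]
      rw [if_pos (by simp [List.getElem?_eq_getElem hlt, hA]),
          if_neg (by simp [List.getElem?_eq_getElem hlt, hA])]
      rw [List.append_nil, pvMerge_append_max_A _ _ _ hboundA hboundO, ih hm']
      simp [hA]
    · by_cases hO : s.toList[m] = 'O'
      · have : ¬ PySem.Str.pyGet? s (m : Int) = some 'A' := by simp [List.getElem?_eq_getElem hlt, hO, hA]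
        simp only [List.filter_cons, List.filter_nil]
        rw [if_neg (by simp [List.getElem?_eq_getElem hlt, hA]),
            if_pos (by simp [List.getElem?_eq_getElem hlt, hO])]
        rw [List.append_nil, pvMerge_append_max_O _ _ _ hboundA hboundO, ih hm']
        simp [hO]
      · have h1 : ¬ PySem.Str.pyGet? s (m : Int) = some 'A' := by simp [List.getElem?_eq_getElem hlt, hA]
        have h2 : ¬ PySem.Str.pyGet? s (m : Int) = some 'O' := by simp [List.getElem?_eq_getElem hlt, hO]
        simp only [List.filter_cons, List.filter_nil]
        rw [if_neg (by simp [List.getElem?_eq_getElem hlt, hA]),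
            if_neg (by simp [List.getElem?_eq_getElem hlt, hO])]
        rw [List.append_nil, List.append_nil, ih hm']
        simp [hA, hO]

-- the two built stacks satisfy the loop invariant
lemma pvInv_init (s : String) (m : Nat) :
    pvInv ((m : Int))
      ((PySem.List.pyRange 0 m 1).filter (fun i => decide (PySem.Str.pyGet? s i = some 'A')))
      ((PySem.List.pyRange 0 m 1).filter (fun i => decide (PySem.Str.pyGet? s i = some 'O'))) := by
  have hrange : ∀ z ∈ PySem.List.pyRange 0 (m : Int) 1, 0 ≤ z ∧ z < (m : Int) :=
    fun z hz => (PySem.List.mem_pyRange_one).mp hz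
  refine ⟨List.Pairwise.filter _ (PySem.List.pairwise_lt_pyRange_one 0 (m : Int)),
          List.Pairwise.filter _ (PySem.List.pairwise_lt_pyRange_one 0 (m : Int)), ?_, ?_⟩
  · intro x hx y hy hxy
    have hxA := List.of_mem_filter hx
    have hyO := List.of_mem_filter hy
    simp only [decide_eq_true_eq] at hxA hyO
    subst hxy
    rw [hxA] at hyO
    simp at hyO
  · intro x hx y hy
    rcases List.mem_append.mp hx with hx | hx <;>
      rcases List.mem_append.mp hy with hy | hy <;>
    · have h1 := hrange x (List.mem_of_mem_filter hx)
      have h2 := hrange y (List.mem_of_mem_filter hy)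
      omega

-- ===== VERDICT (by name: the statement is the Claim_ definition above) =====
theorem predict_winner_spec : Claim_equal_predict_winner := by
  unfold Claim_equal_predict_winner
  intro s _
  unfold Spec_predict_winner
  simp only [predict_winner, predict_winner_alt, PySem.Str.len_eq]
  simp only [pvBuild_eq, List.nil_append]
  have hq : List.filter (fun c => c == 'A' || c == 'O') s.toList
      = pvMerge ((PySem.List.pyRange 0 (s.toList.length : Int) 1).filter
          (fun i => decide (PySem.Str.pyGet? s i = some 'A')))
        ((PySem.List.pyRange 0 (s.toList.length : Int) 1).filter
          (fun i => decide (PySem.Str.pyGet? s i = some 'O'))) := by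
    rw [pvMerge_build s s.toList.length le_rfl, List.take_length]
  simp only [hq, pvSim _ _ _ (pvInv_init s s.toList.length)]
  by_cases h : (pvLoopA (s.toList.length : Int)
      ((PySem.List.pyRange 0 (s.toList.length : Int) 1).filter
        (fun i => decide (PySem.Str.pyGet? s i = some 'A')))
      ((PySem.List.pyRange 0 (s.toList.length : Int) 1).filter
        (fun i => decide (PySem.Str.pyGet? s i = some 'O')))).1 = []
  · simp [h, pvMerge_memA]
  · simp [h, pvMerge_memA]
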